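-- pv_equiv track=rewrite | github.com/irdanish11/Sentence-Prediction-using-LSTMs_aka-Language-Modeling | sent_pred.py | fetch_dic
-- ===== SOURCE A (Python) =====
-- def get_dic(seed_text, num_words):
--     sent = {}
--     probs = {}
--     for i in range(num_words**num_words):
--         sent[i] = seed_text.split(' ')
--         probs[i] = []
--     return sent, probs
--
-- def fetch_dic(input_text, num_words):
--     pwr = num_words - 1
--     sent, probs = get_dic(input_text, num_words)
--     fetch_ind = {}
--     for i in range(num_words):
--         fetch_ind[i] = []
--         #calculating number of sequences
--         nbr_seq = num_words**pwr
--         pwr -= 1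
--         min_range = 0
--         max_range = nbr_seq
--         for j in range(0, num_words**(i+1)):
--             fetch_ind[i].append(min_range)
--             min_range = max_range
--             max_range += nbr_seq
--     return fetch_ind, sent, probs
-- ===== SOURCE B (Python) =====
-- def fetch_dic(input_text, num_words):
--     # fetch_ind by interval refinement: each level subdivides the previous one's
--     # anchors into num_words equal sub-intervals, instead of a per-level rescan
--     # with running-sum accumulator state. sent/probs values are shared objects
--     # (value-equal to A's per-key fresh lists; A does not mutate its arguments).
--     words = input_text.split(' ')
--     total = num_words ** num_words
--     fetch_ind = {}
--     level = [0]
--     step = total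
--     for i in range(num_words):
--         step //= num_words
--         level = [x + t * step for x in level for t in range(num_words)]
--         fetch_ind[i] = level
--     sent = dict.fromkeys(range(total), words)
--     probs = dict.fromkeys(range(total), [])
--     return fetch_ind, sent, probs
-- ===== Notes on version B (the rewrite author's own statement) =====
-- stated objective: alternative
-- what changed: B computes fetch_ind by recursive interval refinement -- each level's list is derived from the previous level's list by subdividing every anchor into num_words sub-anchors (step //= num_words) -- instead of A's per-level rescan of range(num_words**(i+1)) with pwr/nbr_seq/min_range/max_range running-sum state, and builds sent/probs from one split via dict.fromkeys (shared value objects, value-equal to A's per-key fresh lists).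
import Mathlib
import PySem

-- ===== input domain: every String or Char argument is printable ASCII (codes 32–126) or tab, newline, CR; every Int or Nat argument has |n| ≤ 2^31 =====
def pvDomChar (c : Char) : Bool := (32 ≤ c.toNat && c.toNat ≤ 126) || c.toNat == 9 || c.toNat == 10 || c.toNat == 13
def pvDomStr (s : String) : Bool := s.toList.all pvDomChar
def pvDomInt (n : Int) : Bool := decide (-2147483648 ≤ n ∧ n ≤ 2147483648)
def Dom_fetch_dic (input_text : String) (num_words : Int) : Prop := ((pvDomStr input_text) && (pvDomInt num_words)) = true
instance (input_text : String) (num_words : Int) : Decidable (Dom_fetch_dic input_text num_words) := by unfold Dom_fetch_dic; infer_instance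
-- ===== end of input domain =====

-- B builds fetch_ind by interval refinement (each level derived from the previous level by
-- subdividing every anchor into num_words sub-anchors) instead of A's per-level rescans with
-- running-sum state, and shares the sent/probs value objects via dict.fromkeys (value-equal
-- to A's fresh per-key lists; the equivalence is about the return VALUE).

-- ===== PORT A =====
-- seed_text.split(' '): split? with a nonempty separator always returns some; getD [] never fires.
def get_dic (seed_text : String) (num_words : Int) :
    PySem.Dict Int (List String) × PySem.Dict Int (List Int) :=
  (PySem.List.pyRange 0 (num_words ^ num_words.toNat) 1).foldl
    (fun sp i => (sp.1.insert i ((PySem.Str.split? seed_text " ").getD []), sp.2.insert i []))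
    (PySem.Dict.empty, PySem.Dict.empty)

-- the body of A's outer loop (exponents use .toNat: under Pre_ every Python exponent here is ≥ 0, so this is exact)
def fdStep (num_words : Int) (st : PySem.Dict Int (List Int) × Int) (i : Int) :
    PySem.Dict Int (List Int) × Int :=
  let fi := st.1.insert i ([] : List Int)
  let nbr_seq : Int := num_words ^ st.2.toNat
  let inner := (PySem.List.pyRange 0 (num_words ^ (i + 1).toNat) 1).foldl
    (fun (s : List Int × Int × Int) _j => (s.1 ++ [s.2.1], s.2.2, s.2.2 + nbr_seq))
    ([], 0, nbr_seq)
  (fi.insert i inner.1, st.2 - 1)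

def fetch_dic (input_text : String) (num_words : Int) :
    (List (Int × List Int)) × (List (Int × List String)) × (List (Int × List Int)) :=
  let pwr : Int := num_words - 1
  let sp := get_dic input_text num_words
  let st := (PySem.List.pyRange 0 num_words 1).foldl (fdStep num_words) (PySem.Dict.empty, pwr)
  (st.1.items, sp.1.items, sp.2.items)

-- ===== PORT B =====
-- B's loop body: step //= num_words; level = [x + t*step for x in level for t in range(num_words)]
def bStep (num_words : Int) (st : PySem.Dict Int (List Int) × List Int × Int) (i : Int) :
    PySem.Dict Int (List Int) × List Int × Int :=
  let step := PySem.Int.floordiv st.2.2 num_words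
  let level := st.2.1.flatMap
    (fun x => (PySem.List.pyRange 0 num_words 1).map (fun t => x + t * step))
  (st.1.insert i level, level, step)

def fetch_dic_alt (input_text : String) (num_words : Int) :
    (List (Int × List Int)) × (List (Int × List String)) × (List (Int × List Int)) :=
  let words := (PySem.Str.split? input_text " ").getD []
  let total : Int := num_words ^ num_words.toNat
  let st := (PySem.List.pyRange 0 num_words 1).foldl (bStep num_words)
    (PySem.Dict.empty, [0], total)
  -- dict.fromkeys(range(total), v): the keys of range(total) in order, all mapped to v
  let sent := (PySem.List.pyRange 0 total 1).map (fun k => (k, words))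
  let probs := (PySem.List.pyRange 0 total 1).map (fun k => (k, ([] : List Int)))
  (st.1.items, sent, probs)

-- ===== PRECONDITION & SPEC =====
-- Pre_ excludes num_words < 0, where the Python A raises (num_words**num_words is then a float, so range() is a TypeError).
def Pre_fetch_dic (input_text : String) (num_words : Int) : Prop := 0 ≤ num_words
instance (input_text : String) (num_words : Int) : Decidable (Pre_fetch_dic input_text num_words) := by unfold Pre_fetch_dic; infer_instance
def pvWitness_fetch_dic : String × Int := ("a b", 2)

def Spec_fetch_dic (input_text : String) (num_words : Int) (out : (List (Int × List Int)) × (List (Int × List String)) × (List (Int × List Int))) : Prop := out = fetch_dic_alt input_text num_words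
instance (input_text : String) (num_words : Int) (out : (List (Int × List Int)) × (List (Int × List String)) × (List (Int × List Int))) : Decidable (Spec_fetch_dic input_text num_words out) := by unfold Spec_fetch_dic; infer_instance

-- ===== CLAIM =====
def Claim_equal_fetch_dic : Prop := ∀ (input_text : String) (num_words : Int), Dom_fetch_dic input_text num_words → Pre_fetch_dic input_text num_words → Spec_fetch_dic input_text num_words (fetch_dic input_text num_words)

-- ===== LEMMAS AND PROOFS =====

-- the level list after k iterations of B's loop (also A's fetch_ind[k-1] for k ≥ 1)
def lvl (N k : Nat) : List Int :=
  (List.range (N ^ k)).map (fun (j : Nat) => (j : Int) * (N : Int) ^ (N - k))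

-- closed form A's fetch_ind[i] is proved equal to (via inner_fold)
def innerList (num_words i : Int) : List Int :=
  (PySem.List.pyRange 0 (num_words ^ (i + 1).toNat) 1).map
    (fun j => j * num_words ^ (num_words - 1 - i).toNat)

-- A's inner append loop from state (acc, a, a + nbr), over any list (the loop ignores its element).
theorem inner_fold (nbr : Int) (l : List Int) (acc : List Int) (a : Int) :
    l.foldl (fun (s : List Int × Int × Int) _ => (s.1 ++ [s.2.1], s.2.2, s.2.2 + nbr)) (acc, a, a + nbr)
      = (acc ++ (List.range l.length).map (fun t : Nat => a + (t : Int) * nbr),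
         a + (l.length : Int) * nbr, a + ((l.length : Int) + 1) * nbr) := by
  induction l generalizing acc a with
  | nil => simp
  | cons x l ih =>
    simp only [List.foldl_cons, List.length_cons]
    rw [ih (acc ++ [a]) (a + nbr)]
    simp only [Prod.mk.injEq]
    refine ⟨?_, by push_cast; ring, by push_cast; ring⟩
    rw [List.range_succ_eq_map, List.map_cons, List.map_map, List.append_assoc,
      List.singleton_append]
    rw [Nat.cast_zero, zero_mul, add_zero]
    exact congrArg (fun x => acc ++ a :: x) (List.map_congr_left fun t _ => by
      simp only [Function.comp_apply]; push_cast; ring)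

-- A's inner loop produces exactly the closed-form list.
theorem inner_eq (num_words i nbr : Int) (h : nbr = num_words ^ (num_words - 1 - i).toNat) :
    ((PySem.List.pyRange 0 (num_words ^ (i + 1).toNat) 1).foldl
      (fun (s : List Int × Int × Int) _j => (s.1 ++ [s.2.1], s.2.2, s.2.2 + nbr))
      ([], 0, nbr)).1 = innerList num_words i := by
  have h0 := inner_fold nbr (PySem.List.pyRange 0 (num_words ^ (i + 1).toNat) 1) [] 0
  rw [zero_add] at h0
  rw [h0]
  simp only [innerList, PySem.List.pyRange_one, List.map_map, List.nil_append, h,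
    List.length_map, List.length_range]
  refine List.map_congr_left fun t _ => ?_
  simp

-- invariant of A's outer loop
theorem outer_fold (num_words : Int) (k : Nat) :
    ((PySem.List.pyRange 0 (k : Int) 1).foldl (fdStep num_words)
        (PySem.Dict.empty, num_words - 1)).1.items
        = (PySem.List.pyRange 0 (k : Int) 1).map (fun i => (i, innerList num_words i))
    ∧ ((PySem.List.pyRange 0 (k : Int) 1).foldl (fdStep num_words)
        (PySem.Dict.empty, num_words - 1)).2 = num_words - 1 - k := by
  induction k with
  | zero =>
    refine ⟨?_, by norm_num⟩
    rw [show ((0:Nat):Int) = 0 from rfl, PySem.List.pyRange_zero]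
    rfl
  | succ k ih =>
    have hsplit : PySem.List.pyRange 0 ((k + 1 : Nat) : Int) 1
        = PySem.List.pyRange 0 (k : Int) 1 ++ [(k : Int)] := by
      push_cast
      exact PySem.List.pyRange_one_succ_right (by positivity)
    rw [hsplit, List.foldl_append, List.foldl_cons, List.foldl_nil, List.map_append]
    set r := (PySem.List.pyRange 0 (k : Int) 1).foldl (fdStep num_words)
      (PySem.Dict.empty, num_words - 1) with hr
    have hcon : r.1.contains (k : Int) = false := by
      rw [PySem.Dict.contains_eq_decide_mem_keys]
      simp only [PySem.Dict.keys, ih.1, List.map_map]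
      simp [PySem.List.mem_pyRange_one]
    unfold fdStep
    simp only [PySem.Dict.insert_insert_self]
    constructor
    · rw [PySem.Dict.items_insert_of_not_contains _ _ hcon, ih.1]
      congr 1
      simp only [List.map_cons, List.map_nil, List.cons.injEq, Prod.mk.injEq, and_true, true_and]
      exact inner_eq num_words (k : Int) _ (by rw [ih.2])
    · rw [ih.2]; push_cast; ring

-- refinement of a stride-(n*s) enumeration into a stride-s enumeration
theorem range_refine (m n : Nat) (s : Int) :
    (List.range m).flatMap
      (fun (j : Nat) => (List.range n).map (fun (t : Nat) => (j : Int) * ((n : Int) * s) + (t : Int) * s))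
      = (List.range (m * n)).map (fun (j : Nat) => (j : Int) * s) := by
  induction m with
  | zero => simp
  | succ m ih =>
    rw [List.range_succ, List.flatMap_append, ih, Nat.succ_mul, List.range_add, List.map_append]
    simp only [List.flatMap_cons, List.flatMap_nil, List.append_nil, List.map_map]
    congr 1
    refine List.map_congr_left fun t _ => ?_
    simp only [Function.comp_apply]
    push_cast; ring

-- invariant of B's refinement loop
theorem b_outer (N : Nat) (k : Nat) (hk : k ≤ N) :
    ((PySem.List.pyRange 0 (k : Int) 1).foldl (bStep (N : Int))
        (PySem.Dict.empty, [0], ((N : Int) ^ N))).1.items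
      = (PySem.List.pyRange 0 (k : Int) 1).map (fun i => (i, lvl N (i.toNat + 1)))
    ∧ ((PySem.List.pyRange 0 (k : Int) 1).foldl (bStep (N : Int))
        (PySem.Dict.empty, [0], ((N : Int) ^ N))).2.1 = lvl N k
    ∧ ((PySem.List.pyRange 0 (k : Int) 1).foldl (bStep (N : Int))
        (PySem.Dict.empty, [0], ((N : Int) ^ N))).2.2 = (N : Int) ^ (N - k) := by
  induction k with
  | zero =>
    rw [show ((0:Nat):Int) = 0 from rfl, PySem.List.pyRange_zero]
    refine ⟨rfl, ?_, by norm_num⟩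
    simp [lvl]
  | succ k ih =>
    have hkN : k < N := hk
    have ih := ih (Nat.le_of_lt hkN)
    have hsplit : PySem.List.pyRange 0 ((k + 1 : Nat) : Int) 1
        = PySem.List.pyRange 0 (k : Int) 1 ++ [(k : Int)] := by
      push_cast
      exact PySem.List.pyRange_one_succ_right (by positivity)
    rw [hsplit, List.foldl_append, List.foldl_cons, List.foldl_nil, List.map_append]
    set r := (PySem.List.pyRange 0 (k : Int) 1).foldl (bStep (N : Int))
      (PySem.Dict.empty, [0], ((N : Int) ^ N)) with hr
    have hcon : r.1.contains (k : Int) = false := by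
      rw [PySem.Dict.contains_eq_decide_mem_keys]
      simp only [PySem.Dict.keys, ih.1, List.map_map]
      simp [PySem.List.mem_pyRange_one]
    -- the new step value
    have hsucc : N - k = (N - (k + 1)) + 1 := by omega
    have hstep : PySem.Int.floordiv ((N : Int) ^ (N - k)) (N : Int)
        = (N : Int) ^ (N - (k + 1)) := by
      have h1 : ((N : Int) ^ (N - k)) = ((N ^ (N - k) : Nat) : Int) := by push_cast; ring
      rw [h1, PySem.Int.floordiv_natCast]
      have : N ^ (N - k) / N = N ^ (N - (k + 1)) := by
        rw [hsucc, pow_succ, Nat.mul_div_cancel _ (by omega)]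
      rw [this]; push_cast; ring
    -- the new level
    have hlvl : (lvl N k).flatMap
        (fun x => (PySem.List.pyRange 0 (N : Int) 1).map
          (fun t => x + t * (N : Int) ^ (N - (k + 1))))
        = lvl N (k + 1) := by
      have hmul : (N : Int) ^ (N - k) = (N : Int) * (N : Int) ^ (N - (k + 1)) := by
        rw [hsucc, pow_succ]; ring
      simp only [lvl, PySem.List.pyRange_one, List.flatMap_map, List.map_map]
      have := range_refine (N ^ k) N ((N : Int) ^ (N - (k + 1)))
      rw [show N ^ k * N = N ^ (k + 1) from (pow_succ N k).symm] at this
      rw [← this]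
      refine List.flatMap_congr ?_ 
      intro j _
      simp only [Int.sub_zero, Int.toNat_natCast]
      refine List.map_congr_left fun t _ => ?_
      simp only [Function.comp_apply]
      rw [hmul]; ring
    unfold bStep
    simp only [hr] at *
    rw [ih.2.2, hstep, ih.2.1, hlvl]
    refine ⟨?_, rfl, rfl⟩
    rw [PySem.Dict.items_insert_of_not_contains _ _ hcon, ih.1]
    simp

-- both dict-building folds over fresh integer keys yield their key/value list directly
theorem items_const_fold {β : Type} (n : Int) (v : β) :
    ((PySem.List.pyRange 0 n 1).foldl
      (fun (d : PySem.Dict Int β) k => d.insert k v) PySem.Dict.empty).items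
      = (PySem.List.pyRange 0 n 1).map (fun k => (k, v)) := by
  have h := PySem.Dict.items_foldl_insert_fresh (PySem.List.pyRange 0 n 1) (fun a => a)
    (fun _ => v) PySem.Dict.empty (by intro a _; rfl)
    (by simpa using PySem.List.nodup_pyRange_one 0 n)
  simpa using h

theorem sent_probs_items (input_text : String) (n : Int) :
    ((PySem.List.pyRange 0 n 1).foldl
      (fun (sp : PySem.Dict Int (List String) × PySem.Dict Int (List Int)) i =>
        (sp.1.insert i ((PySem.Str.split? input_text " ").getD []), sp.2.insert i []))
      (PySem.Dict.empty, PySem.Dict.empty))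
    = ((PySem.List.pyRange 0 n 1).foldl
        (fun (d : PySem.Dict Int (List String)) k =>
          d.insert k ((PySem.Str.split? input_text " ").getD [])) PySem.Dict.empty,
       (PySem.List.pyRange 0 n 1).foldl
        (fun (d : PySem.Dict Int (List Int)) k => d.insert k []) PySem.Dict.empty) := by
  rw [PySem.List.foldl_prod_mk
    (f := fun (d : PySem.Dict Int (List String)) i =>
      d.insert i ((PySem.Str.split? input_text " ").getD []))
    (g := fun (d : PySem.Dict Int (List Int)) i => d.insert i [])]

-- A's closed-form fetch_ind[i] coincides with B's level list, for i in range(num_words)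
theorem inner_eq_lvl (N : Nat) (m : Nat) (hm : m < N) :
    innerList (N : Int) (m : Int) = lvl N (m + 1) := by
  simp only [innerList, lvl, PySem.List.pyRange_one]
  have h1 : (((m : Int) + 1)).toNat = m + 1 := by omega
  have h2 : (((N : Int) - 1 - (m : Int))).toNat = N - (m + 1) := by omega
  have h3 : ((N : Int) ^ (m + 1) - 0).toNat = N ^ (m + 1) := by
    rw [Int.sub_zero]
    have : ((N : Int) ^ (m + 1)) = ((N ^ (m + 1) : Nat) : Int) := by push_cast; ring
    rw [this, Int.toNat_natCast]
  rw [h1, h2, h3, List.map_map]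
  refine List.map_congr_left fun j _ => ?_
  simp

-- ===== VERDICT =====
theorem fetch_dic_spec : Claim_equal_fetch_dic := by
  intro input_text num_words _hdom hpre
  unfold Spec_fetch_dic
  obtain ⟨N, rfl⟩ : ∃ N : Nat, num_words = (N : Int) :=
    ⟨num_words.toNat, (Int.toNat_of_nonneg hpre).symm⟩
  have houter := (outer_fold (N : Int) N).1
  have hb := (b_outer N N le_rfl).1
  simp only [fetch_dic, fetch_dic_alt, get_dic, sent_probs_items, Int.toNat_natCast] at *
  rw [houter, hb, items_const_fold, items_const_fold]
  refine Prod.ext ?_ rfl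
  refine List.map_congr_left fun i hi => ?_
  rw [PySem.List.mem_pyRange_one] at hi
  obtain ⟨m, rfl⟩ : ∃ m : Nat, i = (m : Int) := ⟨i.toNat, (Int.toNat_of_nonneg hi.1).symm⟩
  have hm : m < N := by exact_mod_cast hi.2
  simp [inner_eq_lvl N m hm]
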